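-- pv_equiv track=rewrite | github.com/antonericson/AOC | 2023/03/solution.py | adjac
-- ===== SOURCE A (Python) =====
-- def adjac(ele, sub=[]):
--     if not ele:
--         yield sub
--     else:
--         yield from (
--             idx
--             for j in range(ele[0] - 1, ele[0] + 2)
--             for idx in adjac(ele[1:], sub + [j])
--         )
-- ===== SOURCE B (Python) =====
-- from itertools import product
--
-- def adjac(ele, sub=[]):
--     for combo in product(*(range(e - 1, e + 2) for e in ele)):
--         yield sub + list(combo)
-- ===== Notes on version B (the rewrite author's own statement) =====
-- stated objective: idiomatic
-- what changed: Replaces the explicit recursion with itertools.product over the per-element ranges, yielding sub + list(combo) for each tuple of the cartesian product.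
import Mathlib
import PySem

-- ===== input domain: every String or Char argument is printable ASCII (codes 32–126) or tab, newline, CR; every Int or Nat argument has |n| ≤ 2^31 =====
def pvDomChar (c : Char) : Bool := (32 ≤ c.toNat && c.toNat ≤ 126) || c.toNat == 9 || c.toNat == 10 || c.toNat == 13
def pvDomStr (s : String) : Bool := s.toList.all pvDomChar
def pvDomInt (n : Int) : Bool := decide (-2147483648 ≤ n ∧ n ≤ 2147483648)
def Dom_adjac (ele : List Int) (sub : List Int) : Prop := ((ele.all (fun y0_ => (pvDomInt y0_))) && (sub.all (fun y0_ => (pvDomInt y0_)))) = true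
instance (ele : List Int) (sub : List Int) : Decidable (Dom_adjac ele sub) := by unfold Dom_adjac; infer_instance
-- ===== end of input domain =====

-- ===== PORT A =====
-- A: recursion over ele, yielding sub when ele is empty, else for each j in
-- range(ele[0]-1, ele[0]+2) the recursive results on ele[1:] with sub + [j].
def adjac (ele : List Int) (sub : List Int) : List (List Int) :=
  match ele with
  | [] => [sub]
  | e :: rest =>
      (PySem.List.pyRange (e - 1) (e + 2) 1).flatMap
        (fun j => adjac rest (sub ++ [j]))

-- ===== PORT B =====
-- B: itertools.product of the ranges, folded right-to-left, then prepend sub.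
def pvProduct (rs : List (List Int)) : List (List Int) :=
  rs.foldr (fun r acc => r.flatMap (fun j => acc.map (fun c => j :: c))) [[]]

def adjac_alt (ele : List Int) (sub : List Int) : List (List Int) :=
  (pvProduct (ele.map (fun e => PySem.List.pyRange (e - 1) (e + 2) 1))).map
    (fun c => sub ++ c)

-- ===== PRECONDITION & SPEC =====
def Spec_adjac (ele : List Int) (sub : List Int) (out : List (List Int)) : Prop := out = adjac_alt ele sub
instance (ele : List Int) (sub : List Int) (out : List (List Int)) : Decidable (Spec_adjac ele sub out) := by unfold Spec_adjac; infer_instance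

-- ===== CLAIM (what is proved, stated in full; the proofs are below) =====
def Claim_equal_adjac : Prop := ∀ (ele : List Int) (sub : List Int), Dom_adjac ele sub → Spec_adjac ele sub (adjac ele sub)

-- ===== LEMMAS AND PROOFS =====
theorem adjac_eq_alt (ele sub : List Int) : adjac ele sub = adjac_alt ele sub := by
  induction ele generalizing sub with
  | nil => simp [adjac, adjac_alt, pvProduct]
  | cons e rest ih =>
      simp only [adjac, adjac_alt, pvProduct, List.map_cons, List.foldr_cons]
      rw [List.map_flatMap]
      apply List.flatMap_congr
      intro j _
      rw [ih]
      simp [adjac_alt, pvProduct, List.map_map, Function.comp_def]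

-- ===== VERDICT (by name: the statement is the Claim_ definition above) =====
theorem adjac_spec : Claim_equal_adjac := by
  intro ele sub _
  unfold Spec_adjac
  exact adjac_eq_alt ele sub
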